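-- pv_equiv track=rewrite | github.com/bitcoineazy/Study_Practice | Python/ symmetric encryption/s.py | Chahack
-- ===== SOURCE A (Python) =====
-- def Chahack(mes):
--     numdict = {}
--     for i in set(mes):
--         numdict[i] = mes.count(i)
--     chmax= max(numdict.values())
--     plist = []
--     for k, v in numdict.items():
--         if v == chmax:
--             plist.append(k)
--     for ch in plist:
--         yield [chr(ord(i) - (ord(ch) - ord(" "))) for i in mes]
-- ===== SOURCE B (Python) =====
-- def Chahack(mes):
--     # sort-then-scan: rank the distinct chars by descending frequency (stable sort),
--     # then yield the leading run of equally-most-frequent chars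
--     ranked = sorted(set(mes), key=lambda c: -mes.count(c))
--     cmax = mes.count(ranked[0])
--     for ch in ranked:
--         if mes.count(ch) != cmax:
--             break
--         shift = ord(ch) - ord(" ")
--         yield [chr(ord(i) - shift) for i in mes]
-- ===== Notes on version B (the rewrite author's own statement) =====
-- stated objective: alternative
-- what changed: B abandons A's dict-of-counts + max + filter passes for a sort-then-scan: it sorts the distinct chars by descending frequency (stable) and yields the leading run of tied chars, stopping at the first char whose count drops below the head's.
import Mathlib
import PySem

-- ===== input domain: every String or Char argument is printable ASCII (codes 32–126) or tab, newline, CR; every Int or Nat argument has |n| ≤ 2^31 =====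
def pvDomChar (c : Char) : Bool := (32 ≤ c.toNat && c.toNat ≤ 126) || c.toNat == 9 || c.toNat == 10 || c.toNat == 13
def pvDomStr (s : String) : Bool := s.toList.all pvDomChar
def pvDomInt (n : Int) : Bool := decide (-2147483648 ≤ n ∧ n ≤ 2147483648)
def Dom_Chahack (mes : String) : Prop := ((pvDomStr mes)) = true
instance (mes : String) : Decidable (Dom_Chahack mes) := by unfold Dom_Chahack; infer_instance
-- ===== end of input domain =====

-- B replaces A's dict-of-counts + max + filter passes by a sort-then-scan: rank the distinct chars
-- by descending frequency (stable sort) and yield the leading run of tied chars (objective: alternative).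
-- Both Pythons are generators; each yield is one element of the output list.

-- chr(ord(i) - (ord(ch) - ord(' '))): exact whenever the code point is nonnegative (guaranteed by Pre_,
-- which excludes the inputs where Python's chr raises ValueError); shared by both ports as written in both Pythons.
def pvShift (ch i : Char) : String :=
  String.ofList [Char.ofNat (((i.toNat : Int) - ((ch.toNat : Int) - 32)).toNat)]

-- ===== PORT A =====
def Chahack (mes : String) : List (List String) :=
  let l := mes.toList
  -- numdict = {}; for i in set(mes): numdict[i] = mes.count(i)
  let numdict : PySem.Dict Char Int :=
    (PySem.Set.ofList l).foldl (fun d i => d.insert i (List.count i l : Int)) PySem.Dict.empty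
  -- chmax = max(numdict.values())  (ValueError on empty — excluded by Pre_)
  match PySem.List.max? numdict.values (fun x => x) with
  | none => []
  | some chmax =>
    -- plist = []; for k, v in numdict.items(): if v == chmax: plist.append(k)
    let plist := numdict.items.foldl (fun acc p => if p.2 == chmax then acc ++ [p.1] else acc) []
    -- for ch in plist: yield [chr(ord(i) - (ord(ch) - ord(' '))) for i in mes]
    plist.map (fun ch => l.map (fun i => pvShift ch i))

-- ===== PORT B =====
def Chahack_alt (mes : String) : List (List String) :=
  let l := mes.toList
  -- ranked = sorted(set(mes), key=lambda c: -mes.count(c))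
  let ranked := PySem.List.sorted (PySem.Set.ofList l) (fun c => -(List.count c l : Int))
  match ranked with
  | [] => []  -- ranked[0] raises IndexError on the empty string — excluded by Pre_
  | r0 :: _ =>
    -- cmax = mes.count(ranked[0])
    let cmax : Int := (List.count r0 l : Int)
    -- for ch in ranked: if mes.count(ch) != cmax: break; yield [chr(ord(i) - shift) for i in mes]
    (ranked.takeWhile (fun ch => (List.count ch l : Int) == cmax)).map
      (fun ch => l.map (fun i => pvShift ch i))

-- ===== PRECONDITION & SPEC =====
-- Pre_ = exactly the inputs on which A returns: the empty string is excluded (max() raises ValueError),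
-- and so are strings in which some most-frequent char ch and some char i satisfy ord(i) - (ord(ch) - 32) < 0
-- (chr raises ValueError there). B raises on the same inputs (IndexError / the same chr ValueError).
-- Boolean form of: every most-frequent char c satisfies ord(c) ≤ ord(i) + 32 for all i in mes
def pvPreB (mes : String) : Bool :=
  mes.toList.all (fun c =>
    !(mes.toList.all (fun d => List.count d mes.toList ≤ List.count c mes.toList)) ||
    mes.toList.all (fun i => c.toNat ≤ i.toNat + 32))
def Pre_Chahack (mes : String) : Prop :=
  mes.toList ≠ [] ∧ pvPreB mes = true
instance (mes : String) : Decidable (Pre_Chahack mes) := by unfold Pre_Chahack; infer_instance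

def pvWitness_Chahack : String := ("aab")

def Spec_Chahack (mes : String) (out : List (List String)) : Prop := out = Chahack_alt mes
instance (mes : String) (out : List (List String)) : Decidable (Spec_Chahack mes out) := by unfold Spec_Chahack; infer_instance

-- ===== CLAIM (what is proved, stated in full; the proofs are below) =====
def Claim_equal_Chahack : Prop := ∀ (mes : String), Dom_Chahack mes → Pre_Chahack mes → Spec_Chahack mes (Chahack mes)

-- ===== LEMMAS AND PROOFS =====

-- unfolding equations for PySem's insertion step
lemma pv_insertBy_nil {α : Type} (before : α → α → Bool) (x : α) :
    PySem.List.insertBy before x [] = [x] := rfl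

lemma pv_insertBy_cons {α : Type} (before : α → α → Bool) (x y : α) (ys : List α) :
    PySem.List.insertBy before x (y :: ys)
      = if before x y then x :: y :: ys else y :: PySem.List.insertBy before x ys := rfl

-- takeWhile distributes over an append whose left part wholly satisfies p
lemma pv_tw_append {α : Type} (p : α → Bool) (A B : List α) (h : ∀ a ∈ A, p a = true) :
    (A ++ B).takeWhile p = A ++ B.takeWhile p := by
  induction A with
  | nil => simp
  | cons a t ih =>
    rw [List.cons_append, List.takeWhile_cons_of_pos (h a (by simp)),
      ih (fun x hx => h x (by simp [hx])), List.cons_append]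

lemma pv_tw_dropWhile {α : Type} (p : α → Bool) (s : List α) :
    (s.dropWhile p).takeWhile p = [] := by
  induction s with
  | nil => rfl
  | cons a t ih =>
    by_cases h : p a = true
    · rw [List.dropWhile_cons_of_pos h]; exact ih
    · rw [List.dropWhile_cons_of_neg h, List.takeWhile_cons_of_neg h]

-- inserting a maximal-count element lands right after the block of maximal-count elements
lemma pv_ins_p (cnt : Char → Int) (M : Int) (x : Char) (s : List Char)
    (hs : ∀ c ∈ s, cnt c ≤ M) (hx : cnt x = M) :
    PySem.List.insertBy (fun a b => decide (-(cnt a) < -(cnt b))) x s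
      = s.takeWhile (fun c => cnt c == M) ++ x :: s.dropWhile (fun c => cnt c == M) := by
  induction s with
  | nil => rfl
  | cons y t ih =>
    rw [pv_insertBy_cons]
    by_cases hy : cnt y = M
    · rw [if_neg (by simp [hx, hy]), List.takeWhile_cons_of_pos (by simp [hy]),
        List.dropWhile_cons_of_pos (by simp [hy]),
        ih (fun c hc => hs c (List.mem_cons_of_mem _ hc)), List.cons_append]
    · have hlt : cnt y < M := lt_of_le_of_ne (hs y (by simp)) hy
      rw [if_pos (by rw [decide_eq_true_eq]; omega), List.takeWhile_cons_of_neg (by simp [hy]),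
        List.dropWhile_cons_of_neg (by simp [hy]), List.nil_append]

-- inserting a non-maximal element does not change the takeWhile prefix
lemma pv_ins_np (cnt : Char → Int) (M : Int) (x : Char) (s : List Char)
    (hxlt : cnt x < M) :
    (PySem.List.insertBy (fun a b => decide (-(cnt a) < -(cnt b))) x s).takeWhile
        (fun c => cnt c == M)
      = s.takeWhile (fun c => cnt c == M) := by
  induction s with
  | nil =>
    rw [pv_insertBy_nil, List.takeWhile_cons_of_neg (by simp; omega), List.takeWhile_nil]
  | cons y t ih =>
    rw [pv_insertBy_cons]
    by_cases hb : cnt y < cnt x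
    · rw [if_pos (by rw [decide_eq_true_eq]; omega),
        List.takeWhile_cons_of_neg (by simp; omega),
        List.takeWhile_cons_of_neg (by simp; omega)]
    · rw [if_neg (by rw [decide_eq_true_eq]; omega)]
      by_cases hy : cnt y = M
      · rw [List.takeWhile_cons_of_pos (by simp [hy]),
          List.takeWhile_cons_of_pos (by simp [hy]), ih]
      · rw [List.takeWhile_cons_of_neg (by simp [hy]),
          List.takeWhile_cons_of_neg (by simp [hy])]

-- stability for the maximal class: the leading run of the stable sort by descending count
-- is exactly the filter of the original list by "count = M"
lemma pv_tw_sorted (cnt : Char → Int) (M : Int) (u : List Char)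
    (hub : ∀ c ∈ u, cnt c ≤ M) :
    (PySem.List.sorted u (fun c => -(cnt c))).takeWhile (fun c => cnt c == M)
      = u.filter (fun c => cnt c == M) := by
  induction u using List.reverseRecOn with
  | nil => rfl
  | append_singleton u x ih =>
    have hub' : ∀ c ∈ u, cnt c ≤ M := fun c hc => hub c (by simp [hc])
    have hxle : cnt x ≤ M := hub x (by simp)
    have hsmem : ∀ c ∈ PySem.List.sorted u (fun c => -(cnt c)), cnt c ≤ M := by
      intro c hc
      exact hub' c ((PySem.List.mem_sorted _ _ _ _).1 hc)
    rw [PySem.List.sorted_eq_foldl_insertBy, List.foldl_append, List.foldl_cons, List.foldl_nil,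
      ← PySem.List.sorted_eq_foldl_insertBy]
    by_cases hx : cnt x = M
    · rw [pv_ins_p cnt M x _ hsmem hx,
        pv_tw_append _ _ _ (fun a ha => List.mem_takeWhile_imp (p := fun c => cnt c == M) ha),
        List.takeWhile_cons_of_pos (by simp [hx]), pv_tw_dropWhile, ih hub']
      simp [List.filter_append, hx]
    · have hxlt : cnt x < M := lt_of_le_of_ne hxle hx
      rw [pv_ins_np cnt M x _ hxlt, ih hub']
      simp [List.filter_append, hx]

-- ===== VERDICT (by name: the statement is the Claim_ definition above) =====
theorem Chahack_spec : Claim_equal_Chahack := by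
  intro mes _ hpre
  obtain ⟨hne, _⟩ := hpre
  unfold Spec_Chahack Chahack Chahack_alt
  set l := mes.toList with hl
  -- A's dict: insert over the distinct chars, all fresh, so its items list is a map over set(mes)
  have hAitems :
      ((PySem.Set.ofList l).foldl (fun d i => d.insert i (List.count i l : Int)) PySem.Dict.empty).items
        = (PySem.Set.ofList l).map (fun c => (c, (List.count c l : Int))) := by
    have := PySem.Dict.items_foldl_insert_fresh (PySem.Set.ofList l)
      (fun c => c) (fun c => (List.count c l : Int)) PySem.Dict.empty
      (by intro a _; simp [PySem.Dict.contains_empty])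
      (by simpa using PySem.Set.nodup_ofList l)
    simpa using this
  have hune : PySem.Set.ofList l ≠ [] := by
    rcases List.exists_mem_of_ne_nil l hne with ⟨x, hx⟩
    intro h
    have := (PySem.Set.mem_ofList l x).2 hx
    rw [h] at this
    simp at this
  have hrne : PySem.List.sorted (PySem.Set.ofList l) (fun c => -(List.count c l : Int)) ≠ [] :=
    fun h => hune ((PySem.List.sorted_eq_nil_iff _ _ _).1 h)
  obtain ⟨r0, t, hr⟩ := List.exists_cons_of_ne_nil hrne
  simp only [PySem.Dict.values, hAitems, List.map_map]
  rw [hr]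
  have hvals : (List.map (Prod.snd ∘ fun c : Char => (c, (List.count c l : Int))) (PySem.Set.ofList l))
      = List.map (fun c : Char => (List.count c l : Int)) (PySem.Set.ofList l) := rfl
  rw [hvals]
  have hMex : ∃ m, PySem.List.max? (List.map (fun c : Char => (List.count c l : Int)) (PySem.Set.ofList l)) (fun x => x) = some m := by
    cases h : PySem.List.max? (List.map (fun c : Char => (List.count c l : Int)) (PySem.Set.ofList l)) (fun x => x) with
    | none =>
      exfalso
      rw [PySem.List.max?_eq_none_iff] at h
      exact hune (List.map_eq_nil_iff.mp h)
    | some m => exact ⟨m, rfl⟩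
  obtain ⟨chmax, hM⟩ := hMex
  rw [hM]
  -- the head of the descending-count sort has the maximal count
  have hr0u : r0 ∈ PySem.Set.ofList l := (PySem.List.mem_sorted _ _ _ _).1 (by rw [hr]; simp)
  have hle1 : (List.count r0 l : Int) ≤ chmax :=
    PySem.List.max?_isMax hM _ (List.mem_map.2 ⟨r0, hr0u, rfl⟩)
  obtain ⟨c, hcu, hcm⟩ := List.mem_map.1 (PySem.List.max?_mem hM)
  have hhd := PySem.List.key_head_sorted_le _ _ hr c hcu
  simp only at hhd
  have hEq : (List.count r0 l : Int) = chmax := by omega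
  have hub : ∀ d ∈ PySem.Set.ofList l, (List.count d l : Int) ≤ chmax := fun d hd =>
    PySem.List.max?_isMax hM _ (List.mem_map.2 ⟨d, hd, rfl⟩)
  -- A's plist loop is a filter over the distinct chars
  have hplist :
      List.foldl (fun acc p => if p.2 == chmax then acc ++ [p.1] else acc) ([] : List Char)
          (List.map (fun c => (c, (List.count c l : Int))) (PySem.Set.ofList l))
        = (PySem.Set.ofList l).filter (fun c => (List.count c l : Int) == chmax) := by
    rw [show (List.foldl (fun acc p => if p.2 == chmax then acc ++ [p.1] else acc) ([] : List Char)
          (List.map (fun c => (c, (List.count c l : Int))) (PySem.Set.ofList l)))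
        = [] ++ ((List.map (fun c => (c, (List.count c l : Int))) (PySem.Set.ofList l)).filter
            (fun p => p.2 == chmax)).map Prod.fst
      from PySem.List.foldl_append_if (fun p : Char × Int => p.2 == chmax) Prod.fst _ []]
    simp [List.filter_map, Function.comp_def]
  -- B's leading run is the same filter, by stability of the sort on the maximal class
  have htw : List.takeWhile (fun ch => (List.count ch l : Int) == (List.count r0 l : Int)) (r0 :: t)
      = (PySem.Set.ofList l).filter (fun c => (List.count c l : Int) == chmax) := by
    rw [hEq, ← hr]
    exact pv_tw_sorted (fun c => (List.count c l : Int)) chmax _ hub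
  simp only [hplist, htw]
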